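-- pv_equiv track=rewrite | github.com/FabriceSalvaire/elbrea | Elbrea/GUI/Viewer/IntensityProfile.py | back_profile
-- ===== SOURCE A (Python) =====
-- def back_profile(y_input):
--
--     x = 0
--     yc = 0
--     x_output = [x]
--     y_output = [yc]
--     for y in y_input:
--         if y != yc:
--             x_output.append(x)
--             y_output.append(yc)
--             x_output.append(x)
--             y_output.append(y)
--             yc = y
--         x += 1
--     if yc != 0:
--         x_output.append(x)
--         y_output.append(yc)
--     x_output.append(x)
--     y_output.append(0)
--
--     return x_output, y_output
-- ===== SOURCE B (Python) =====
-- def back_profile(y_input):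
--     # Pass 1: collapse into runs of equal consecutive values (start_index, value).
--     runs = []
--     i = 0
--     for y in y_input:
--         if not runs or runs[-1][1] != y:
--             runs.append((i, y))
--         i += 1
--     # Pass 2: emit step coordinates from the runs.
--     x_output = [0]
--     y_output = [0]
--     prev = 0
--     for start, v in runs:
--         if v != prev:
--             x_output.append(start)
--             y_output.append(prev)
--             x_output.append(start)
--             y_output.append(v)
--             prev = v
--     n = len(y_input)
--     last = y_input[-1] if y_input else 0
--     if last != 0:
--         x_output.append(n)
--         y_output.append(last)
--     x_output.append(n)
--     y_output.append(0)
--     return x_output, y_output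
-- ===== Notes on version B (the rewrite author's own statement) =====
-- stated objective: idiomatic
-- what changed: B separates the work into two passes: first collapse the input into runs of equal consecutive values, then emit the step coordinates from the run list, with the closing points computed from len() and the last element instead of loop-carried state.
import Mathlib
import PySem

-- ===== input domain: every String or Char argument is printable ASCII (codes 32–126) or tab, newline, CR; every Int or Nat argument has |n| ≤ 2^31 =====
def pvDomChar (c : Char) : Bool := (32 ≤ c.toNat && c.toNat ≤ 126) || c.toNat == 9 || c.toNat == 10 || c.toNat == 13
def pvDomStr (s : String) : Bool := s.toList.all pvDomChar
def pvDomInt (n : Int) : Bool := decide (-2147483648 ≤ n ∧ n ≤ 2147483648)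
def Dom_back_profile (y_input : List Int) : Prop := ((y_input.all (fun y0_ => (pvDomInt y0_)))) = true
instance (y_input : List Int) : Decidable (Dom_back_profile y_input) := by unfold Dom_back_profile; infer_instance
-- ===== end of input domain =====

-- B replaces A's single stateful loop by two passes (collapse into runs of equal
-- consecutive values, then emit the step coordinates from the run list); same cost,
-- claimed objective: idiomatic decomposition.

-- ===== PORT A =====
def pvStepA (st : Int × Int × List Int × List Int) (y : Int) : Int × Int × List Int × List Int :=
  let (x, yc, xo, yo) := st
  if y ≠ yc then (x + 1, y, xo ++ [x, x], yo ++ [yc, y])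
  else (x + 1, yc, xo, yo)

def back_profile (y_input : List Int) : List Int × List Int :=
  let st := y_input.foldl pvStepA (0, 0, [0], [0])
  let (x, yc, xo, yo) := st
  let (xo2, yo2) := if yc ≠ 0 then (xo ++ [x], yo ++ [yc]) else (xo, yo)
  (xo2 ++ [x], yo2 ++ [0])

-- ===== PORT B =====
-- pass 1 step: 'if not runs or runs[-1][1] != y: runs.append((i, y))'
def pvStepRun (st : Int × List (Int × Int)) (y : Int) : Int × List (Int × Int) :=
  let (i, runs) := st
  let runs' :=
    match runs.getLast? with
    | none => runs ++ [(i, y)]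
    | some p => if p.2 ≠ y then runs ++ [(i, y)] else runs
  (i + 1, runs')

-- pass 2 step: emit coordinates for a run whose value differs from prev
def pvStepEmit (st : Int × List Int × List Int) (r : Int × Int) : Int × List Int × List Int :=
  let (prev, xo, yo) := st
  if r.2 ≠ prev then (r.2, xo ++ [r.1, r.1], yo ++ [prev, r.2]) else (prev, xo, yo)

def back_profile_alt (y_input : List Int) : List Int × List Int :=
  let rs := y_input.foldl pvStepRun (0, [])
  let st2 := rs.2.foldl pvStepEmit (0, [0], [0])
  let (_, xo, yo) := st2
  let n : Int := y_input.length
  let last : Int := if y_input = [] then 0 else (PySem.List.pyGet? y_input (-1)).getD 0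
  let (xo2, yo2) := if last ≠ 0 then (xo ++ [n], yo ++ [last]) else (xo, yo)
  (xo2 ++ [n], yo2 ++ [0])

-- ===== PRECONDITION & SPEC =====
def Spec_back_profile (y_input : List Int) (out : List Int × List Int) : Prop := out = back_profile_alt y_input
instance (y_input : List Int) (out : List Int × List Int) : Decidable (Spec_back_profile y_input out) := by unfold Spec_back_profile; infer_instance

-- ===== CLAIM (what is proved, stated in full; the proofs are below) =====
def Claim_equal_back_profile : Prop := ∀ (y_input : List Int), Dom_back_profile y_input → Spec_back_profile y_input (back_profile y_input)

-- ===== LEMMAS AND PROOFS =====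

/-- The "events" of the profile: final current value, and the two coordinate tails
appended while scanning `l` from position `x` with current value `yc`. -/
def pvEvs : List Int → Int → Int → Int × List Int × List Int
  | [], _, yc => (yc, [], [])
  | y :: t, x, yc =>
    if y = yc then pvEvs t (x + 1) yc
    else
      let r := pvEvs t (x + 1) y
      (r.1, x :: x :: r.2.1, yc :: y :: r.2.2)

/-- The run list produced by B's first pass from position `i`, with `p` the value of
the last already-recorded run (none if no run yet). -/
def pvRuns : List Int → Int → Option Int → List (Int × Int)
  | [], _, _ => []
  | y :: t, i, p =>
    if p = some y then pvRuns t (i + 1) p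
    else (i, y) :: pvRuns t (i + 1) (some y)

lemma pvFoldA (l : List Int) (x yc : Int) (xo yo : List Int) :
    l.foldl pvStepA (x, yc, xo, yo) =
      (x + l.length, (pvEvs l x yc).1, xo ++ (pvEvs l x yc).2.1, yo ++ (pvEvs l x yc).2.2) := by
  induction l generalizing x yc xo yo with
  | nil => simp [pvEvs]
  | cons y t ih =>
    by_cases h : y = yc
    · subst h
      simp [pvStepA, pvEvs, ih, List.foldl_cons]
      omega
    · simp [pvStepA, pvEvs, h, ih, List.foldl_cons]
      omega

lemma pvFoldRuns (l : List Int) (i : Int) (acc : List (Int × Int)) :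
    l.foldl pvStepRun (i, acc) =
      (i + l.length, acc ++ pvRuns l i (acc.getLast?.map Prod.snd)) := by
  induction l generalizing i acc with
  | nil => simp [pvRuns]
  | cons y t ih =>
    rw [List.foldl_cons]
    rcases hl : acc.getLast? with _ | p
    · have : pvStepRun (i, acc) y = (i + 1, acc ++ [(i, y)]) := by
        simp [pvStepRun, hl]
      rw [this, ih]
      simp [pvRuns, hl]
      omega
    · by_cases hv : p.2 = y
      · have : pvStepRun (i, acc) y = (i + 1, acc) := by
          simp [pvStepRun, hl, hv]
        rw [this, ih]
        simp [pvRuns, hl, hv]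
        omega
      · have : pvStepRun (i, acc) y = (i + 1, acc ++ [(i, y)]) := by
          simp [pvStepRun, hl, hv]
        rw [this, ih]
        have : (p.2 = y) = False := by simp [hv]
        simp [pvRuns, hl, hv]
        omega

lemma pvEmitRuns (l : List Int) (x yc : Int) (xo yo : List Int) :
    (pvRuns l x (some yc)).foldl pvStepEmit (yc, xo, yo) =
      ((pvEvs l x yc).1, xo ++ (pvEvs l x yc).2.1, yo ++ (pvEvs l x yc).2.2) := by
  induction l generalizing x yc xo yo with
  | nil => simp [pvRuns, pvEvs]
  | cons y t ih =>
    by_cases h : y = yc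
    · subst h
      simp [pvRuns, pvEvs, ih]
    · have h' : ¬ (some yc = some y) := by simp [Ne.symm h]
      simp only [pvRuns, pvEvs, if_neg h', if_neg h, List.foldl_cons]
      have : pvStepEmit (yc, xo, yo) (x, y) = (y, xo ++ [x, x], yo ++ [yc, y]) := by
        simp [pvStepEmit, h]
      rw [this, ih]
      simp

lemma pvRunsNone (l : List Int) (x : Int) (xo yo : List Int) :
    (pvRuns l x none).foldl pvStepEmit (0, xo, yo) =
      (pvRuns l x (some (0 : Int))).foldl pvStepEmit (0, xo, yo) := by
  cases l with
  | nil => rfl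
  | cons y t =>
    by_cases h : y = 0
    · subst h
      simp [pvRuns, pvStepEmit]
    · have h' : ¬ (some (0 : Int) = some y) := by simp [Ne.symm h]
      simp [pvRuns, h']

lemma pvEvs_fst (l : List Int) (x yc : Int) : (pvEvs l x yc).1 = l.getLastD yc := by
  induction l generalizing x yc with
  | nil => simp [pvEvs]
  | cons y t ih =>
    by_cases h : y = yc
    · subst h; simp [pvEvs, ih, List.getLast?_cons, List.getLastD_eq_getLast?]
    · simp [pvEvs, h, ih, List.getLast?_cons, List.getLastD_eq_getLast?]

-- ===== VERDICT (by name: the statement is the Claim_ definition above) =====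
theorem back_profile_spec : Claim_equal_back_profile := by
  intro l _
  show back_profile l = back_profile_alt l
  unfold back_profile back_profile_alt
  rw [pvFoldA]
  simp only [pvFoldRuns l 0 [], List.getLast?_nil, Option.map_none, List.nil_append]
  rw [pvRunsNone, pvEmitRuns]
  have hlast : (if l = [] then (0 : Int) else (PySem.List.pyGet? l (-1)).getD 0) = l.getLastD 0 := by
    cases l with
    | nil => simp
    | cons y t =>
      simp [PySem.List.pyGet?_neg_one, List.getLastD_eq_getLast?]
  simp only [hlast, pvEvs_fst, zero_add]
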